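-- pv_equiv track=rewrite | github.com/NicoOhR/AdventOfCode | python/2024/day9.py | defrag
-- ===== SOURCE A (Python) =====
-- def defrag(s):
--     last = len(s) - 1
--     map = list(s)
--     for idx in range(len(map)):
--         if map[idx] == '.':
--             while last > idx and map[last] == '.':
--                 last -= 1
--             if last > idx:
--                 map[last], map[idx] = map[idx], map[last]
--                 last -= 1
--     return ''.join(map)
-- ===== SOURCE B (Python) =====
-- def defrag(s):
--     n = len(s)
--     m = sum(1 for c in s if c != '.')
--     tail = [c for c in reversed(s[m:]) if c != '.']
--     out = []
--     for c in s[:m]: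
--         if c != '.':
--             out.append(c)
--         else:
--             out.append(tail.pop(0))
--     return ''.join(out) + '.' * (n - m)
-- ===== Notes on version B (the rewrite author's own statement) =====
-- stated objective: alternative
-- what changed: A compacts in place with an outer index and an inward-moving right pointer, swapping each dot with the rightmost remaining non-dot; B instead counts the non-dots m, precomputes the reverse-order tail of non-dots of s[m:], and builds the output in a single forward pass over s[:m] followed by trailing dots.
import Mathlib
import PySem

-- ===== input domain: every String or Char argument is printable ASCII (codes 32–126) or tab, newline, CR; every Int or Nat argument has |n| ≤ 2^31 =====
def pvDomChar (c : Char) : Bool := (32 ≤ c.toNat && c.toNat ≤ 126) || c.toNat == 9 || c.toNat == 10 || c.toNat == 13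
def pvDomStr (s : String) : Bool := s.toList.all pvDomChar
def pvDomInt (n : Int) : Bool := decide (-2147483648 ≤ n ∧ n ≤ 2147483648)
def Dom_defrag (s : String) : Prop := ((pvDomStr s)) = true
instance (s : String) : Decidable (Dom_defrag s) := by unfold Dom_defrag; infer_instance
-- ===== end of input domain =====

-- B replaces A's in-place two-pointer swapping by a non-dot count, a precomputed reverse tail, and one forward pass (objective: alternative decomposition).

-- ===== PORT A =====
-- the inner 'while last > idx and map[last] == ".": last -= 1'
def defragWhile (m : List Char) (idx last : Int) : Int :=
  if last > idx ∧ PySem.List.pyGet? m last = some '.' then defragWhile m idx (last - 1) else last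
termination_by (last - idx).toNat
decreasing_by omega

-- the outer 'for idx in range(len(map))' loop, carrying (map, last)
def defragLoop (m : List Char) (idx : Nat) (last : Int) : List Char :=
  if hidx : idx < m.length then
    if PySem.List.pyGet? m (idx : Int) = some '.' then
      let last' := defragWhile m (idx : Int) last
      if last' > (idx : Int) then
        -- swap map[last'] and map[idx]; map[idx] = '.' in this branch (matched just above)
        match PySem.List.pyGet? m last' with
        | some b => defragLoop ((m.set last'.toNat '.').set idx b) (idx + 1) (last' - 1)
        | none => []  -- unreachable: in every reachable state 0 ≤ last' < len(map)
      else defragLoop m (idx + 1) last'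
    else defragLoop m (idx + 1) last
  else m
termination_by m.length - idx
decreasing_by all_goals simp [List.length_set] at *; omega

def defrag (s : String) : String :=
  String.ofList (defragLoop s.toList 0 ((s.toList.length : Int) - 1))

-- ===== PORT B =====
-- the forward pass: copy non-dots, a dot consumes tail.pop(0)
def fillAlt : List Char → List Char → List Char
  | [], _ => []
  | c :: rest, tail =>
    if c != '.' then c :: fillAlt rest tail
    else match tail with
      | t :: ts => t :: fillAlt rest ts                  -- tail.pop(0)
      | [] => []  -- unreachable: tail holds exactly one char for every dot of s[:m]

def defrag_alt (s : String) : String :=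
  let l := s.toList
  let n := l.length
  let m := l.countP (· != '.')                           -- m = sum(1 for c in s if c != '.')
  let tail := ((l.drop m).reverse).filter (· != '.')     -- [c for c in reversed(s[m:]) if c != '.']
  String.ofList (fillAlt (l.take m) tail ++ List.replicate (n - m) '.')

-- ===== PRECONDITION & SPEC =====
def Spec_defrag (s : String) (out : String) : Prop := out = defrag_alt s
instance (s : String) (out : String) : Decidable (Spec_defrag s out) := by unfold Spec_defrag; infer_instance

-- ===== CLAIM (what is proved, stated in full; the proofs are below) =====
def Claim_equal_defrag : Prop := ∀ (s : String), Dom_defrag s → Spec_defrag s (defrag s)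

-- ===== LEMMAS AND PROOFS =====

-- B's result as a function of the char list (defrag_alt with its lets unfolded)
def Bspec (t : List Char) : List Char :=
  fillAlt (t.take (t.countP (· != '.'))) (((t.drop (t.countP (· != '.'))).reverse).filter (· != '.'))
    ++ List.replicate (t.length - t.countP (· != '.')) '.'

theorem Bspec_nil : Bspec [] = [] := by simp [Bspec, fillAlt]

theorem Bspec_cons_nondot {c : Char} {t : List Char} (h : c ≠ '.') :
    Bspec (c :: t) = c :: Bspec t := by
  have hb : (c != '.') = true := by simpa using h
  simp [Bspec, hb, fillAlt, List.take_succ_cons, Nat.succ_sub_succ]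

theorem Bspec_alldots {t : List Char} (h : ∀ d ∈ t, d = '.') : Bspec t = t := by
  have hc : t.countP (· != '.') = 0 := by
    rw [List.countP_eq_zero]
    intro a ha; simpa using h a ha
  simp [Bspec, hc, fillAlt]
  exact (List.eq_replicate_iff.mpr ⟨rfl, h⟩).symm

theorem Bspec_swap {u v : List Char} {c : Char} (hc : c ≠ '.') (hv : ∀ d ∈ v, d = '.') :
    Bspec ('.' :: (u ++ c :: v)) = c :: Bspec (u ++ '.' :: v) := by
  have hcb : (c != '.') = true := by simpa using hc
  have hkv : v.countP (· != '.') = 0 := by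
    rw [List.countP_eq_zero]; intro a ha; simpa using hv a ha
  have hfv : v.reverse.filter (· != '.') = [] := by
    rw [List.filter_eq_nil_iff]; intro a ha
    simp [hv a (List.mem_reverse.1 ha)]
  have hku : u.countP (· != '.') ≤ u.length := List.countP_le_length
  set ku := u.countP (· != '.') with hkudef
  have hk1 : ('.' :: (u ++ c :: v)).countP (· != '.') = ku + 1 := by
    simp [List.countP_append, hkv, hcb, hkudef]
  have hk2 : (u ++ '.' :: v).countP (· != '.') = ku := by
    simp [List.countP_append, hkv, hkudef]
  have htk : (u ++ c :: v).take ku = u.take ku := List.take_append_of_le_length hku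
  have htk2 : (u ++ '.' :: v).take ku = u.take ku := List.take_append_of_le_length hku
  have hdr : (u ++ c :: v).drop ku = u.drop ku ++ c :: v := List.drop_append_of_le_length hku
  have hdr2 : (u ++ '.' :: v).drop ku = u.drop ku ++ '.' :: v := List.drop_append_of_le_length hku
  rw [Bspec, Bspec, hk1, hk2, htk2, hdr2, List.take_succ_cons, htk, List.drop_succ_cons, hdr]
  simp only [List.reverse_append, List.reverse_cons, List.filter_append, hfv, List.append_assoc,
    List.nil_append, List.filter_cons, hcb]
  have hlen : ('.' :: (u ++ c :: v)).length - (ku + 1) = (u ++ '.' :: v).length - ku := by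
    simp
  rw [hlen]
  simp [fillAlt]

theorem exists_last_nondot {t : List Char} (h : 0 < t.countP (· != '.')) :
    ∃ u c v, t = u ++ c :: v ∧ c ≠ '.' ∧ ∀ d ∈ v, d = '.' := by
  induction t using List.reverseRecOn with
  | nil => simp at h
  | append_singleton t0 a ih =>
    by_cases ha : a = '.'
    · subst ha
      have h0 : 0 < t0.countP (· != '.') := by
        simpa [List.countP_append] using h
      obtain ⟨u, c, v, rfl, hc, hv⟩ := ih h0
      exact ⟨u, c, v ++ ['.'], by simp, hc,
        by intro d hd; rcases List.mem_append.1 hd with h1 | h1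
           · exact hv d h1
           · simpa using h1⟩
    · exact ⟨t0, a, [], by simp, ha, by simp⟩

theorem defragWhile_stop (X v : List Char) (c : Char) (idx L : Int)
    (hc : c ≠ '.') (hv : ∀ d ∈ v, d = '.') (hidx : idx < X.length) (hXL : (X.length : Int) ≤ L)
    (hL : L < (X.length + 1 + v.length : Int)) :
    defragWhile (X ++ c :: v) idx L = X.length := by
  rw [defragWhile]
  by_cases hEq : L = (X.length : Int)
  · subst hEq
    rw [if_neg]
    rintro ⟨-, hget⟩
    rw [PySem.List.pyGet?_append_length] at hget
    exact hc (by simpa using hget)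
  · have hgt : (X.length : Int) < L := lt_of_le_of_ne hXL (Ne.symm hEq)
    have h0 : 0 ≤ L := by omega
    have hlen : L < ((X ++ c :: v).length : Int) := by simp; omega
    have hget : PySem.List.pyGet? (X ++ c :: v) L = some ((X ++ c :: v)[L.toNat]'(by omega)) :=
      PySem.List.pyGet?_eq_some_getElem _ h0 hlen
    have helt : (X ++ c :: v)[L.toNat]'(by omega) = '.' := by
      rw [List.getElem_append_right (by omega), List.getElem_cons]
      rw [dif_neg (by omega)]
      exact hv _ (List.getElem_mem _)
    rw [if_pos ⟨by omega, by rw [hget, helt]⟩]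
    exact defragWhile_stop X v c idx (L - 1) hc hv hidx (by omega) (by omega)
termination_by (L - X.length).toNat
decreasing_by omega

theorem defragWhile_alldots (l : List Char) (idx L : Int)
    (h0 : 0 ≤ idx) (hL : L < l.length)
    (hi : ∀ (j : Nat) (h : j < l.length), idx < (j : Int) → l[j] = '.')
    (hinv : ∀ (j : Nat) (h : j < l.length), L < (j : Int) → l[j] = '.') :
    defragWhile l idx L ≤ idx ∧
      ∀ (j : Nat) (h : j < l.length), defragWhile l idx L < (j : Int) → l[j] = '.' := by
  rw [defragWhile]
  by_cases hgt : L ≤ idx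
  · rw [if_neg (by omega)]
    exact ⟨hgt, hinv⟩
  · have hget : PySem.List.pyGet? l L = some (l[L.toNat]'(by omega)) :=
      PySem.List.pyGet?_eq_some_getElem _ (by omega) hL
    have helt : l[L.toNat]'(by omega) = '.' := hi L.toNat (by omega) (by omega)
    rw [if_pos ⟨by omega, by rw [hget, helt]⟩]
    refine defragWhile_alldots l idx (L - 1) h0 (by omega) hi ?_
    intro j hj hLj
    by_cases hjL : (j : Int) = L
    · have : j = L.toNat := by omega
      subst this; exact helt
    · exact hinv j hj (by omega)
termination_by (L - idx).toNat
decreasing_by omega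

theorem getElem_eq_dot_of_suffix {l A w : List Char} (hlw : l = A ++ w)
    (hw : ∀ d ∈ w, d = '.') (j : Nat) (h : j < l.length) (hj : A.length ≤ j) : l[j] = '.' := by
  rw [List.getElem_of_eq hlw]
  rw [List.getElem_append_right hj]
  exact hw _ (List.getElem_mem _)

theorem defragLoop_eq (k : Nat) : ∀ (l : List Char) (idx : Nat) (L : Int),
    l.length - idx ≤ k → L < l.length →
    (∀ (j : Nat) (h : j < l.length), L < (j : Int) → l[j] = '.') →
    defragLoop l idx L = l.take idx ++ Bspec (l.drop idx) := by
  induction k with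
  | zero =>
    intro l idx L hk hL hinv
    have hidx : ¬ idx < l.length := by omega
    rw [defragLoop, dif_neg hidx, List.take_of_length_le (by omega),
      List.drop_eq_nil_of_le (by omega), Bspec_nil, List.append_nil]
  | succ k ih =>
    intro l idx L hk hL hinv
    by_cases hidx : idx < l.length
    · have hdropc : l.drop idx = l[idx] :: l.drop (idx + 1) := List.drop_eq_getElem_cons hidx
      have hgetidx : PySem.List.pyGet? l (idx : Int) = some l[idx] := by
        rw [PySem.List.pyGet?_natCast]
        exact List.getElem?_eq_getElem hidx
      rw [defragLoop, dif_pos hidx]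
      by_cases hc : l[idx] = '.'
      · rw [if_pos (by rw [hgetidx, hc])]
        by_cases hk0 : 0 < (l.drop (idx + 1)).countP (· != '.')
        · -- there is a non-dot to the right: the while loop finds the last one, then swap
          obtain ⟨u, cs, v, hdec, hcn, hv⟩ := exists_last_nondot hk0
          have hlful : l = (l.take idx ++ '.' :: u) ++ cs :: v := by
            conv_lhs => rw [← List.take_append_drop idx l, hdropc, hdec, hc]
            simp
          set X := l.take idx ++ '.' :: u with hX
          have htl : (l.take idx).length = idx := by
            rw [List.length_take]; omega
          have hlX : X.length = idx + 1 + u.length := by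
            simp [hX, htl]; omega
          have hlen2 : l.length = X.length + 1 + v.length := by
            conv_lhs => rw [hlful]
            simp; omega
          have hXlt : X.length < l.length := by omega
          have hgetX : PySem.List.pyGet? l (X.length : Int) = some cs := by
            rw [hlful]
            exact PySem.List.pyGet?_append_length X v cs
          have hgetX' : PySem.List.pyGet? l (X.length : Int) = some (l[X.length]'hXlt) :=
            PySem.List.pyGet?_eq_some_getElem _ (by omega) (by omega)
          have hXval : l[X.length]'hXlt = cs := by
            rw [hgetX] at hgetX'; exact (Option.some.inj hgetX').symm
          have hXL : (X.length : Int) ≤ L := by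
            by_contra h
            exact hcn (hXval ▸ hinv X.length hXlt (by omega))
          have hwhile : defragWhile l (idx : Int) L = X.length := by
            rw [hlful]
            exact defragWhile_stop X v cs idx L hcn hv (by omega) hXL (by omega)
          rw [hwhile, if_pos (by omega), hgetX]
          show defragLoop ((l.set ((X.length : Int)).toNat '.').set idx cs) (idx + 1)
            ((X.length : Int) - 1) = _
          have hnat : (X.length : Int).toNat = X.length := Int.toNat_natCast _
          have hset : (l.set (X.length : Int).toNat '.').set idx cs
              = (l.take idx ++ cs :: u) ++ '.' :: v := by
            rw [hnat]
            conv_lhs => rw [hlful]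
            rw [List.set_append, if_neg (by omega)]
            have h0 : X.length - X.length = 0 := by omega
            rw [h0, List.set_cons_zero, hX]
            rw [List.append_assoc, List.set_append, if_neg (by omega)]
            have h1 : idx - (l.take idx).length = 0 := by omega
            rw [h1, List.set_append, if_pos (by simp), List.set_cons_zero]
            simp
          rw [hset]
          set N := (l.take idx ++ cs :: u) ++ '.' :: v with hN
          have hNfst : (l.take idx ++ cs :: u).length = X.length := by
            simp [htl, hlX]; omega
          have hNlen : N.length = l.length := by
            simp [hN, htl]; omega
          have hrec := ih N (idx + 1) ((X.length : Int) - 1)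
            (by omega) (by rw [hNlen]; omega)
            (by
              intro j hj hLj
              refine getElem_eq_dot_of_suffix hN ?_ j hj (by omega)
              intro d hd
              rcases List.mem_cons.1 hd with h1 | h1
              · exact h1
              · exact hv d h1)
          rw [hrec]
          have hN2 : N = l.take idx ++ cs :: (u ++ '.' :: v) := by
            simp [hN]
          have htake : N.take (idx + 1) = l.take idx ++ [cs] := by
            rw [hN2]
            have : idx + 1 = (l.take idx).length + 1 := by omega
            rw [this, List.take_length_add_append]
            simp
          have hdrop : N.drop (idx + 1) = u ++ '.' :: v := by
            rw [hN2]
            have : idx + 1 = (l.take idx).length + 1 := by omega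
            rw [this, List.drop_length_add_append]
            simp
          rw [htake, hdrop, hdropc, hdec, hc, Bspec_swap hcn hv]
          simp
        · -- everything from idx on is a dot: the while loop falls to ≤ idx, no swap
          have halldots : ∀ d ∈ l.drop (idx + 1), d = '.' := by
            intro d hd
            have := List.countP_eq_zero.1 (by omega : (l.drop (idx+1)).countP (· != '.') = 0) d hd
            simpa using this
          have hi : ∀ (j : Nat) (h : j < l.length), (idx : Int) < (j : Int) → l[j] = '.' := by
            intro j hj hij
            exact getElem_eq_dot_of_suffix (List.take_append_drop (idx+1) l).symm halldots j hj
              (by rw [List.length_take]; omega)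
          obtain ⟨hr1, hr2⟩ := defragWhile_alldots l idx L (by omega) hL hi hinv
          show (if defragWhile l (idx : Int) L > (idx : Int) then _ else _) = _
          rw [if_neg (by omega)]
          have hrec := ih l (idx + 1) (defragWhile l (idx : Int) L) (by omega) (by omega) hr2
          rw [hrec]
          have hall : ∀ d ∈ l.drop idx, d = '.' := by
            rw [hdropc]
            intro d hd
            rcases List.mem_cons.1 hd with h1 | h1
            · rw [h1, hc]
            · exact halldots d h1
          rw [Bspec_alldots hall, Bspec_alldots halldots, hdropc, hc]
          rw [List.take_add_one, List.getElem?_eq_getElem hidx, hc]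
          simp only [Option.toList_some, List.append_assoc, List.singleton_append]
      · -- non-dot at idx: nothing happens
        rw [if_neg (by rw [hgetidx]; simp [hc])]
        have hrec := ih l (idx + 1) L (by omega) hL hinv
        rw [hrec, hdropc, Bspec_cons_nondot hc]
        rw [List.take_add_one, List.getElem?_eq_getElem hidx]
        simp only [Option.toList_some, List.append_assoc, List.singleton_append]
    · rw [defragLoop, dif_neg hidx, List.take_of_length_le (by omega),
        List.drop_eq_nil_of_le (by omega), Bspec_nil, List.append_nil]

-- ===== VERDICT (by name: the statement is the Claim_ definition above) =====
theorem defrag_spec : Claim_equal_defrag := by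
  intro s _
  unfold Spec_defrag defrag defrag_alt
  have h := defragLoop_eq s.toList.length s.toList 0 ((s.toList.length : Int) - 1)
    (by omega) (by omega) (by intro j h hj; omega)
  simp only [h, List.take_zero, List.drop_zero, List.nil_append]
  rfl
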